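-- pv_equiv track=rewrite | github.com/RescueDiver/arcs4 | reasoning/pattern_rule_engine.py | extract_non_separator_spans
-- ===== SOURCE A (Python) =====
-- def extract_non_separator_spans(size, separator_indices):
--     """
--     Example:
--       size=10, separators=[0,5,9]
--       -> spans [(1,4), (6,8)]
--     """
--     spans = []
--     sep_set = set(separator_indices)
--
--     start = None
--     for i in range(size):
--         if i not in sep_set:
--             if start is None:
--                 start = i
--         else:
--             if start is not None:
--                 spans.append((start, i - 1))
--                 start = None
--
--     if start is not None:
--         spans.append((start, size - 1))
--
--     return spans
-- ===== SOURCE B (Python) =====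
-- def extract_non_separator_spans(size, separator_indices):
--     seps = sorted({s for s in separator_indices if 0 <= s < size})
--     spans = []
--     prev = 0
--     for s in seps:
--         if prev <= s - 1:
--             spans.append((prev, s - 1))
--         prev = s + 1
--     if prev <= size - 1:
--         spans.append((prev, size - 1))
--     return spans
-- ===== Notes on version B (the rewrite author's own statement) =====
-- stated objective: faster
-- what changed: Instead of scanning every index in range(size) with a start/None state machine, B sorts the distinct in-range separators once and emits one span per gap between consecutive separators and the boundaries.
import Mathlib
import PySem

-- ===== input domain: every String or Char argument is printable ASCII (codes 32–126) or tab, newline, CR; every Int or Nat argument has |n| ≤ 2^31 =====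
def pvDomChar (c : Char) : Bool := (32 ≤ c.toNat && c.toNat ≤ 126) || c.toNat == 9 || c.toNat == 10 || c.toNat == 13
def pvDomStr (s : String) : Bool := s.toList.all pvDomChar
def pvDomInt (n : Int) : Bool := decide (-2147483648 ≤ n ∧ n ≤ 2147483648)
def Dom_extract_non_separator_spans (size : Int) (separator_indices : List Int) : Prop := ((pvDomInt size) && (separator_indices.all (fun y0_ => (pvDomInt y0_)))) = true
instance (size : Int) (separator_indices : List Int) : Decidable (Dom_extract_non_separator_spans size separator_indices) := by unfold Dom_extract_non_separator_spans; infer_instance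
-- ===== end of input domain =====

-- B replaces A's linear scan of range(size) by sorting the distinct in-range separators
-- and emitting spans from the gaps between them (objective: faster, O(k log k) vs O(size)).

-- ===== PORT A =====
-- loop body of A's 'for i in range(size)' (state: spans so far, optional open start)
def pvStepA (S : PySem.Set Int) (st : List (Int × Int) × Option Int) (i : Int) : List (Int × Int) × Option Int :=
  if !(PySem.Set.contains S i) then
    match st.2 with
    | none => (st.1, some i)
    | some _ => st
  else
    match st.2 with
    | some start => (st.1 ++ [(start, i - 1)], none)
    | none => st

def extract_non_separator_spans (size : Int) (separator_indices : List Int) : List (Int × Int) :=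
  let sepSet : PySem.Set Int := PySem.Set.ofList separator_indices
  let st := (PySem.List.pyRange 0 size 1).foldl (pvStepA sepSet) ([], none)
  match st.2 with
  | some start => st.1 ++ [(start, size - 1)]
  | none => st.1

-- ===== PORT B =====
-- loop body of B's 'for s in seps' (state: spans so far, prev = first index after the last separator seen)
def pvStepB (st : List (Int × Int) × Int) (s : Int) : List (Int × Int) × Int :=
  ((if st.2 ≤ s - 1 then st.1 ++ [(st.2, s - 1)] else st.1), s + 1)

def extract_non_separator_spans_alt (size : Int) (separator_indices : List Int) : List (Int × Int) :=
  let seps := PySem.List.sorted (PySem.Set.ofList (separator_indices.filter (fun s => decide (0 ≤ s) && decide (s < size)))) (fun x => x) false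
  let st := seps.foldl pvStepB ([], 0)
  if st.2 ≤ size - 1 then st.1 ++ [(st.2, size - 1)] else st.1

-- ===== PRECONDITION & SPEC =====
def Spec_extract_non_separator_spans (size : Int) (separator_indices : List Int) (out : List (Int × Int)) : Prop := out = extract_non_separator_spans_alt size separator_indices
instance (size : Int) (separator_indices : List Int) (out : List (Int × Int)) : Decidable (Spec_extract_non_separator_spans size separator_indices out) := by unfold Spec_extract_non_separator_spans; infer_instance

-- ===== CLAIM (what is proved, stated in full; the proofs are below) =====
def Claim_equal_extract_non_separator_spans : Prop := ∀ (size : Int) (separator_indices : List Int), Dom_extract_non_separator_spans size separator_indices → Spec_extract_non_separator_spans size separator_indices (extract_non_separator_spans size separator_indices)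

-- ===== LEMMAS AND PROOFS =====

-- once a span is open and no separator occurs, A's loop keeps the state unchanged
theorem pvStepA_skip (S : PySem.Set Int) (l : List Int) (spans : List (Int × Int)) (x : Int)
    (h : ∀ j ∈ l, j ∉ S) :
    l.foldl (pvStepA S) (spans, some x) = (spans, some x) := by
  induction l with
  | nil => rfl
  | cons a t ih =>
      have ha : a ∉ S := h a (by simp)
      simp only [List.foldl_cons, pvStepA, PySem.Set.contains]
      rw [if_pos (by simpa using ha)]
      exact ih (fun j hj => h j (by simp [hj]))

-- A's loop over a separator-free range [i, b) opens a span at i (if the range is nonempty)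
theorem pvStepA_free (S : PySem.Set Int) (i b : Int) (spans : List (Int × Int))
    (h : ∀ j, i ≤ j → j < b → j ∉ S) :
    (PySem.List.pyRange i b 1).foldl (pvStepA S) (spans, none)
      = if i < b then (spans, some i) else (spans, none) := by
  by_cases hb : i < b
  · rw [PySem.List.pyRange_one_cons hb, if_pos hb]
    simp only [List.foldl_cons, pvStepA, PySem.Set.contains]
    rw [if_pos (by simpa using h i le_rfl hb)]
    exact pvStepA_skip S _ spans i (fun j hj => by
      have := (PySem.List.mem_pyRange_one).1 hj
      exact h j (by omega) (by omega))
  · rw [PySem.List.pyRange_one_eq_nil (by omega), if_neg hb]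
    rfl

-- main invariant: A's remaining scan from prev equals B's fold over the remaining sorted separators
theorem pv_main (size : Int) (S : PySem.Set Int) :
    ∀ (rem : List Int) (prev : Int) (spans : List (Int × Int)),
    rem.Pairwise (· < ·) →
    (∀ j, prev ≤ j → j < size → (j ∈ S ↔ j ∈ rem)) →
    (∀ j ∈ rem, prev ≤ j ∧ j < size) →
    (match (PySem.List.pyRange prev size 1).foldl (pvStepA S) (spans, none) with
      | (sp, some st) => sp ++ [(st, size - 1)]
      | (sp, none) => sp)
    = (let st := rem.foldl pvStepB (spans, prev);
       if st.2 ≤ size - 1 then st.1 ++ [(st.2, size - 1)] else st.1) := by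
  intro rem
  induction rem with
  | nil =>
      intro prev spans _ h2 _
      rw [pvStepA_free S prev size spans (fun j hj1 hj2 hjS => by simpa using (h2 j hj1 hj2).1 hjS)]
      by_cases hp : prev < size
      · simp only [if_pos hp, List.foldl_nil]
        rw [if_pos (by omega)]
      · simp only [if_neg hp, List.foldl_nil]
        rw [if_neg (by omega)]
  | cons s rest ih =>
      intro prev spans h1 h2 h3
      have hs : prev ≤ s ∧ s < size := h3 s (by simp)
      have hrest_lt : ∀ j ∈ rest, s < j := fun j hj => (List.pairwise_cons.1 h1).1 j hj
      -- split the range at s and at s+1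
      rw [PySem.List.pyRange_one_append prev (s+1) size (by omega) (by omega),
          PySem.List.pyRange_one_succ_right (by omega : prev ≤ s), List.foldl_append, List.foldl_append]
      -- the stretch [prev, s) is separator-free
      rw [pvStepA_free S prev s spans (fun j hj1 hj2 hjS => by
        rcases List.mem_cons.1 ((h2 j hj1 (by omega)).1 hjS) with rfl | h
        · omega
        · exact absurd (hrest_lt j h) (by omega))]
      have hsS : s ∈ S := (h2 s hs.1 hs.2).2 (by simp)
      have hstep : ∀ sp : List (Int × Int),
          List.foldl (pvStepA S) (if prev < s then (sp, some prev) else (sp, none)) [s]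
            = ((if prev ≤ s - 1 then sp ++ [(prev, s - 1)] else sp), none) := by
        intro sp
        by_cases hps : prev < s
        · simp only [if_pos hps, if_pos (by omega : prev ≤ s - 1), List.foldl_cons, List.foldl_nil,
            pvStepA, PySem.Set.contains]
          rw [if_neg (by simpa using hsS)]
        · simp only [if_neg hps, if_neg (by omega : ¬ prev ≤ s - 1), List.foldl_cons, List.foldl_nil,
            pvStepA, PySem.Set.contains]
          rw [if_neg (by simpa using hsS)]
      rw [hstep]
      -- apply the induction hypothesis from s+1
      rw [ih (s+1) (if prev ≤ s - 1 then spans ++ [(prev, s - 1)] else spans)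
            (List.pairwise_cons.1 h1).2
            (fun j hj1 hj2 => by
              rw [h2 j (by omega) hj2, List.mem_cons]
              constructor
              · rintro (rfl | h)
                · omega
                · exact h
              · exact Or.inr)
            (fun j hj => ⟨by have := hrest_lt j hj; omega, (h3 j (by simp [hj])).2⟩)]
      simp only [List.foldl_cons, pvStepB]

-- ===== VERDICT (by name: the statement is the Claim_ definition above) =====
theorem extract_non_separator_spans_spec : Claim_equal_extract_non_separator_spans := by
  intro size sep _
  unfold Spec_extract_non_separator_spans extract_non_separator_spans extract_non_separator_spans_alt
  have h := pv_main size (PySem.Set.ofList sep)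
      (PySem.List.sorted (PySem.Set.ofList (sep.filter (fun s => decide (0 ≤ s) && decide (s < size)))) (fun x => x) false)
      0 []
      (PySem.List.sorted_ofList_pairwise_lt _)
      (fun j hj1 hj2 => by
        simp [PySem.List.mem_sorted, PySem.Set.mem_ofList, List.mem_filter, hj1, hj2])
      (fun j hj => by
        simp only [PySem.List.mem_sorted, PySem.Set.mem_ofList, List.mem_filter,
          Bool.and_eq_true, decide_eq_true_eq] at hj
        exact ⟨hj.2.1, hj.2.2⟩)
  simp only [] at h ⊢
  rw [← h]
  cases hfold : (PySem.List.pyRange 0 size 1).foldl (pvStepA (PySem.Set.ofList sep)) ([], none) with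
  | mk sp st => cases st <;> simp
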